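-- pv_equiv track=rewrite | github.com/elderhammer/cs-course | cs61a/cats/cats.py | shifty_shifts
-- ===== SOURCE A (Python) =====
-- def shifty_shifts(start, goal, limit):
--     """A diff function for autocorrect that determines how many letters
--     in START need to be substituted to create GOAL, then adds the difference in
--     their lengths.
--     """
--     # BEGIN PROBLEM 6
--     if len(start) == 0:
--         return len(goal)
--     elif len(goal) == 0:
--         return len(start)
--     else:
--         if start[0] != goal[0]:
--             if limit == 0:
--                 return 1
--             return 1 + shifty_shifts(start[1:], goal[1:], limit - 1)
--         else:
--             return shifty_shifts(start[1:], goal[1:], limit)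
-- ===== SOURCE B (Python) =====
-- def shifty_shifts(start, goal, limit):
--     mism = sum(1 for a, b in zip(start, goal) if a != b)
--     if limit >= 0 and mism > limit:
--         return limit + 1
--     return mism + abs(len(start) - len(goal))
-- ===== Notes on version B (the rewrite author's own statement) =====
-- stated objective: simpler
-- what changed: Replaces the short-circuiting recursion with one aggregate mismatch count over the zipped common prefix plus a closed-form arithmetic decision (limit+1 truncation vs mism + length difference); the count runs in C-level zip/sum instead of per-character Python recursion.
import Mathlib
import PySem

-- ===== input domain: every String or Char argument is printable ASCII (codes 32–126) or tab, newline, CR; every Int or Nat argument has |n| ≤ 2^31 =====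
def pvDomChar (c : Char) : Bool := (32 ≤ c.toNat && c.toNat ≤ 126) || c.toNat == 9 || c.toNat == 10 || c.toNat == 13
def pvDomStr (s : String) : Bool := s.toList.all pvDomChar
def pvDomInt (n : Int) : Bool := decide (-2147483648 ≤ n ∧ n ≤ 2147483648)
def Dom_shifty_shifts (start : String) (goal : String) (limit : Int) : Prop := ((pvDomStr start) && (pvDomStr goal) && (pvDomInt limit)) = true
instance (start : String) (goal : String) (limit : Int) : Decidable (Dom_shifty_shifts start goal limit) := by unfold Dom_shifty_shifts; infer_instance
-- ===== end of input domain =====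

-- B replaces A's short-circuiting recursion by one aggregate mismatch count plus closed-form arithmetic; objective: simpler.

-- ===== PORT A =====
-- literal transliteration of A's recursion over the two strings (as character lists)
def shiftyRecA : List Char → List Char → Int → Int
  | [], g, _ => (g.length : Int)
  | s, [], _ => (s.length : Int)
  | a :: s, b :: g, limit =>
      if a ≠ b then
        if limit = 0 then 1
        else 1 + shiftyRecA s g (limit - 1)
      else shiftyRecA s g limit

def shifty_shifts (start : String) (goal : String) (limit : Int) : Int :=
  shiftyRecA start.toList goal.toList limit

-- ===== PORT B =====
-- mism = sum(1 for a,b in zip(start,goal) if a != b)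
def mismCount (s g : List Char) : Int :=
  (((s.zip g).filter (fun p => p.1 ≠ p.2)).length : Int)

def shifty_shifts_alt (start : String) (goal : String) (limit : Int) : Int :=
  let mism := mismCount start.toList goal.toList
  if 0 ≤ limit ∧ mism > limit then limit + 1
  else mism + |((start.toList.length : Int) - (goal.toList.length : Int))|

-- ===== PRECONDITION & SPEC =====
def Spec_shifty_shifts (start : String) (goal : String) (limit : Int) (out : Int) : Prop := out = shifty_shifts_alt start goal limit
instance (start : String) (goal : String) (limit : Int) (out : Int) : Decidable (Spec_shifty_shifts start goal limit out) := by unfold Spec_shifty_shifts; infer_instance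

-- ===== CLAIM (what is proved, stated in full; the proofs are below) =====
def Claim_equal_shifty_shifts : Prop := ∀ (start : String) (goal : String) (limit : Int), Dom_shifty_shifts start goal limit → Spec_shifty_shifts start goal limit (shifty_shifts start goal limit)

-- ===== LEMMAS AND PROOFS =====

theorem abs_succ_sub_succ (x y : Int) : |x + 1 - (y + 1)| = |x - y| := by
  have h : x + 1 - (y + 1) = x - y := by ring
  rw [h]

theorem mismCount_nonneg (s g : List Char) : 0 ≤ mismCount s g :=
  Int.natCast_nonneg _

theorem shiftyRecA_closed : ∀ (s g : List Char) (limit : Int),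
    shiftyRecA s g limit =
      if 0 ≤ limit ∧ mismCount s g > limit then limit + 1
      else mismCount s g + |((s.length : Int) - (g.length : Int))| := by
  intro s
  induction s with
  | nil =>
      intro g limit
      simp [shiftyRecA, mismCount]
  | cons a s ih =>
      intro g limit
      cases g with
      | nil =>
          simp [shiftyRecA, mismCount]
          rw [if_neg (by omega), abs_of_nonneg (by positivity)]
      | cons b g =>
          by_cases hab : a = b
          · rw [show shiftyRecA (a :: s) (b :: g) limit = shiftyRecA s g limit by
              simp [shiftyRecA, hab]]
            rw [ih]
            have hm : mismCount (a :: s) (b :: g) = mismCount s g := by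
              simp [mismCount, hab]
            rw [hm]
            simp only [List.length_cons]
            push_cast
            rw [abs_succ_sub_succ]
          · have hm : mismCount (a :: s) (b :: g) = 1 + mismCount s g := by
              simp [mismCount, hab]; omega
            have hnn := mismCount_nonneg s g
            by_cases hl : limit = 0
            · rw [show shiftyRecA (a :: s) (b :: g) limit = 1 by
                simp [shiftyRecA, hab, hl]]
              rw [hm]
              split_ifs with h
              · omega
              · exfalso; omega
            · rw [show shiftyRecA (a :: s) (b :: g) limit = 1 + shiftyRecA s g (limit - 1) by
                simp [shiftyRecA, hab, hl]]
              rw [ih, hm]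
              simp only [List.length_cons]
              push_cast
              rw [abs_succ_sub_succ]
              have habs := abs_nonneg ((s.length : Int) - (g.length : Int))
              split_ifs <;> omega

-- ===== VERDICT (by name: the statement is the Claim_ definition above) =====
theorem shifty_shifts_spec : Claim_equal_shifty_shifts := by
  intro start goal limit _
  unfold Spec_shifty_shifts shifty_shifts shifty_shifts_alt
  simpa using shiftyRecA_closed start.toList goal.toList limit
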